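-- pv_equiv track=rewrite | github.com/Boom0704/BaejoonHub | Python3/프로그래머스/1/82612. 부족한 금액 계산하기/부족한 금액 계산하기.py | solution
-- ===== SOURCE A (Python) =====
-- def solution(price, money, count):
--     value = 0
--     for i in range (1, count+1):
--         value += i
--     totalValue = price * value
--     if money > totalValue:
--         return 0
--     answer = totalValue - money
--
--     return answer
-- ===== SOURCE B (Python) =====
-- def solution(price, money, count):
--     total = price * (count * (count + 1) // 2 if count > 0 else 0)
--     return max(total - money, 0)
-- ===== Notes on version B (the rewrite author's own statement) =====
-- stated objective: faster
-- what changed: replaces the O(count) summation loop with the closed-form triangular number count*(count+1)//2 and folds the final branch into max(total-money,0)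
import Mathlib
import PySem

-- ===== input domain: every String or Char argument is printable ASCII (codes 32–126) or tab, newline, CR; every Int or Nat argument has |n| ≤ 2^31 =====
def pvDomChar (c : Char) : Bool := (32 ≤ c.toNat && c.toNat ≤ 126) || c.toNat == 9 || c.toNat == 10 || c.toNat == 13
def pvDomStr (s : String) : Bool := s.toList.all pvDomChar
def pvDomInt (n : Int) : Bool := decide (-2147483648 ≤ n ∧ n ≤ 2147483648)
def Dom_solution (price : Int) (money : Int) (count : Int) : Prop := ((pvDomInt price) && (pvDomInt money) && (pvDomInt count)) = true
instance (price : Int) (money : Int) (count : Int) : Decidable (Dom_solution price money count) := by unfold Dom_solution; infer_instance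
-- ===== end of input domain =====

-- B replaces A's O(count) summation loop with the closed-form triangular number (faster, asymptotic).

-- ===== PORT A =====
def solution (price : Int) (money : Int) (count : Int) : Int :=
  let value := (PySem.List.pyRange 1 (count + 1) 1).foldl (fun acc i => acc + i) 0
  let totalValue := price * value
  if money > totalValue then 0
  else totalValue - money

-- ===== PORT B =====
def solution_alt (price : Int) (money : Int) (count : Int) : Int :=
  let total := price * (if count > 0 then PySem.Int.floordiv (count * (count + 1)) 2 else 0)
  max (total - money) 0

-- ===== PRECONDITION & SPEC =====
def Spec_solution (price : Int) (money : Int) (count : Int) (out : Int) : Prop := out = solution_alt price money count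
instance (price : Int) (money : Int) (count : Int) (out : Int) : Decidable (Spec_solution price money count out) := by unfold Spec_solution; infer_instance

-- ===== CLAIM (what is proved, stated in full; the proofs are below) =====
def Claim_equal_solution : Prop := ∀ (price : Int) (money : Int) (count : Int), Dom_solution price money count → Spec_solution price money count (solution price money count)

-- ===== LEMMAS AND PROOFS =====

theorem pv_sum_range (n : Nat) :
    (PySem.List.pyRange 1 ((n : Int) + 1) 1).foldl (fun acc i => acc + i) 0 = (n : Int) * ((n : Int) + 1) / 2 := by
  induction n with
  | zero => simp [PySem.List.pyRange_one_eq_nil]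
  | succ m ih =>
    rw [show ((m + 1 : Nat) : Int) + 1 = ((m : Int) + 1) + 1 by push_cast; ring,
        PySem.List.pyRange_one_succ_right (a := 1) (b := (m : Int) + 1) (by omega),
        List.foldl_append, ih]
    simp only [List.foldl]
    obtain ⟨r, hr⟩ := Int.even_mul_succ_self (m:Int)
    obtain ⟨q, hq⟩ := Int.even_mul_succ_self ((m:Int)+1)
    have h1 : ((m:Int)+1)*(((m:Int)+1)+1) = (m:Int)*((m:Int)+1) + 2*((m:Int)+1) := by ring
    push_cast
    omega

theorem solution_sum (count : Int) :
    (PySem.List.pyRange 1 (count + 1) 1).foldl (fun acc i => acc + i) 0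
      = (if count > 0 then PySem.Int.floordiv (count * (count + 1)) 2 else 0) := by
  split_ifs with h
  · obtain ⟨n, rfl⟩ : ∃ n : Nat, count = (n : Int) := ⟨count.toNat, (Int.toNat_of_nonneg (le_of_lt h)).symm⟩
    rw [PySem.Int.floordiv_eq_ediv_of_pos (by norm_num), pv_sum_range]
  · rw [PySem.List.pyRange_one_eq_nil (by omega)]
    rfl

-- ===== VERDICT (by name: the statement is the Claim_ definition above) =====
theorem solution_spec : Claim_equal_solution := by
  intro price money count _
  unfold Spec_solution solution solution_alt
  rw [solution_sum]
  set t := (if count > 0 then PySem.Int.floordiv (count * (count + 1)) 2 else 0)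
  simp only []
  omega
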